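-- pv_equiv track=rewrite | github.com/mjmilne1/UltraPlatform | modules/event_schema_management/management.py | _determine_strategy
-- ===== SOURCE A (Python) =====
-- def _determine_strategy(changes):
--     '''Determine migration strategy'''
--     if not changes:
--         return 'no_migration'
--
--     # Check change types
--     change_types = [c['type'] for c in changes]
--
--     if 'change_type' in change_types:
--         return 'transform_migration'
--     elif 'remove_field' in change_types:
--         return 'lossy_migration'
--     else:
--         return 'additive_migration'
-- ===== SOURCE B (Python) =====
-- _SEVERITY = {'change_type': 2, 'remove_field': 1}
-- _STRATEGY = ('additive_migration', 'lossy_migration', 'transform_migration')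
--
-- def _determine_strategy(changes):
--     '''Determine migration strategy'''
--     if not changes:
--         return 'no_migration'
--     return _STRATEGY[max(_SEVERITY.get(c['type'], 0) for c in changes)]
-- ===== Notes on version B (the rewrite author's own statement) =====
-- stated objective: alternative
-- what changed: Replaces the build-type-list-then-two-membership-scans chain of returns with an arithmetical formulation: each change is mapped to a numeric severity (change_type=2, remove_field=1, else 0), the maximum severity is taken in one pass, and the strategy name is read from an indexed table.
import Mathlib
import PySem

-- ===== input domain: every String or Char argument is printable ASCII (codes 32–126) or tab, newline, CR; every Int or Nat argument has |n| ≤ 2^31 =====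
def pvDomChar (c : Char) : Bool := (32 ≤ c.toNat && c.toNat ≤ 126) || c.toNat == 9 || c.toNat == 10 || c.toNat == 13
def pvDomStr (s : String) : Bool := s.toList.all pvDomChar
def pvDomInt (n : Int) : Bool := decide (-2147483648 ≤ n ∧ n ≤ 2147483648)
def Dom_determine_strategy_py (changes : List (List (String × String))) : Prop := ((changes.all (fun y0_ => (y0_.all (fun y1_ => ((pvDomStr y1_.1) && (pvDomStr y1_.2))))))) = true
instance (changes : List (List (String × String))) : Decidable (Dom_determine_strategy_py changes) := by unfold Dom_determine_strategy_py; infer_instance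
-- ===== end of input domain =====

-- B replaces A's type-list-plus-two-membership-tests with a numeric severity max and an indexed strategy table (alternative formulation, same cost).

-- c['type'] on the association list (first match); default "" is only reached outside Pre_
def pvTypeOf (c : List (String × String)) : String :=
  ((c.find? (fun p => p.1 == "type")).map (·.2)).getD ""

-- ===== PORT A =====
def determine_strategy_py (changes : List (List (String × String))) : String :=
  if changes = [] then "no_migration"
  else
    let change_types := changes.map pvTypeOf
    if change_types.contains "change_type" then "transform_migration"
    else if change_types.contains "remove_field" then "lossy_migration"
    else "additive_migration"

-- ===== PORT B =====
-- _SEVERITY.get(t, 0): first-match lookup in the two-entry dict, default 0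
def pvSeverity (t : String) : Nat :=
  (PySem.Dict.getD (PySem.Dict.ofList [("change_type", 2), ("remove_field", 1)]) t 0)

def pvStrategyTable : List String :=
  ["additive_migration", "lossy_migration", "transform_migration"]

def determine_strategy_py_alt (changes : List (List (String × String))) : String :=
  if changes = [] then "no_migration"
  else
    let level := ((changes.map (fun c => pvSeverity (pvTypeOf c))).max?).getD 0
    pvStrategyTable.getD level ""

-- ===== PRECONDITION & SPEC =====
-- Pre_ excludes inputs where some change lacks a "type" key: there Python A raises KeyError.
def Pre_determine_strategy_py (changes : List (List (String × String))) : Prop :=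
  ∀ c ∈ changes, (c.find? (fun p => p.1 == "type")).isSome
instance (changes : List (List (String × String))) : Decidable (Pre_determine_strategy_py changes) := by unfold Pre_determine_strategy_py; infer_instance
def pvWitness_determine_strategy_py : (List (List (String × String))) := [[("type", "add_field")]]

def Spec_determine_strategy_py (changes : List (List (String × String))) (out : String) : Prop := out = determine_strategy_py_alt changes
instance (changes : List (List (String × String))) (out : String) : Decidable (Spec_determine_strategy_py changes out) := by unfold Spec_determine_strategy_py; infer_instance

-- ===== CLAIM (what is proved, stated in full; the proofs are below) =====
def Claim_equal_determine_strategy_py : Prop := ∀ (changes : List (List (String × String))), Dom_determine_strategy_py changes → Pre_determine_strategy_py changes → Spec_determine_strategy_py changes (determine_strategy_py changes)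

-- ===== LEMMAS AND PROOFS =====
-- severity takes only three values, determined by the two tag equalities
theorem pvSeverity_eq (t : String) :
    pvSeverity t = if t = "change_type" then 2 else if t = "remove_field" then 1 else 0 := by
  have hd : PySem.Dict.ofList [("change_type", (2:Nat)), ("remove_field", 1)]
      = PySem.Dict.mk [("change_type", 2), ("remove_field", 1)] := by rfl
  have hnil : (PySem.Dict.mk ([] : List (String × Nat))).get? t = none := rfl
  rw [pvSeverity, hd, PySem.Dict.getD]
  simp only [PySem.Dict.get?_mk_cons, beq_iff_eq]
  by_cases h1 : t = "change_type"
  · subst h1; simp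
  · by_cases h2 : t = "remove_field"
    · subst h2
      simp [show ¬(("change_type" : String) = "remove_field") by decide]
    · have a : ¬(("change_type" : String) = t) := fun h => h1 h.symm
      have b : ¬(("remove_field" : String) = t) := fun h => h2 h.symm
      simp [a, b, h1, h2, hnil]

-- cons step of the running maximum (max? of the mapped tail, default 0)
theorem pvMaxStep (t : String) (rest : List String) :
    ((t :: rest).map pvSeverity).max?.getD 0
      = max (pvSeverity t) ((rest.map pvSeverity).max?.getD 0) := by
  cases h : (rest.map pvSeverity).max? with
  | none => simp [List.max?_cons, h]
  | some m => simp [List.max?_cons, h]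

-- the max severity over a list of types is 2/1/0 exactly by membership of the two tags
theorem maxSeverity_eq (ts : List String) :
    ((ts.map pvSeverity).max?).getD 0 =
      if "change_type" ∈ ts then 2
      else if "remove_field" ∈ ts then 1 else 0 := by
  induction ts with
  | nil => simp
  | cons t rest ih =>
    rw [pvMaxStep, ih, pvSeverity_eq]
    by_cases h1 : t = "change_type" <;> by_cases h2 : t = "remove_field" <;>
      by_cases hc : "change_type" ∈ rest <;>
        by_cases hr : "remove_field" ∈ rest <;>
          simp_all <;> simp [Ne.symm h1, Ne.symm h2]

-- ===== VERDICT (by name: the statement is the Claim_ definition above) =====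
theorem determine_strategy_py_spec : Claim_equal_determine_strategy_py := by
  intro changes _ _
  unfold Spec_determine_strategy_py determine_strategy_py determine_strategy_py_alt
  by_cases h : changes = []
  · simp [h]
  · have hmm : (changes.map fun c => pvSeverity (pvTypeOf c)) = (changes.map pvTypeOf).map pvSeverity := by
      simp [List.map_map]
    simp only [if_neg h, hmm, maxSeverity_eq, List.contains_iff_mem]
    split_ifs <;> rfl
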